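-- pv_equiv track=rewrite | github.com/clindoso/clindoso-gpt-translation-test | gpt-project/_data/scripts/translation_with_aligner.py | extract_translated_text
-- ===== SOURCE A (Python) =====
-- def extract_translated_text(translated_lines):
--     # Initialize marker count
--     marker_count = 0
--     for _, target_lines in translated_lines:
--         # Ignore segments while the end of the frontmatter is not found
--         if target_lines == "---":
--             marker_count += 1
--             if marker_count < 2:
--                 continue # Skip until the second '---' is found
--         # Start yielding segments after second '---' is found
--         if target_lines == "---" and marker_count >= 2:
--             continue
--         elif marker_count >= 2:
--             yield target_lines
-- ===== SOURCE B (Python) =====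
-- def extract_translated_text(translated_lines):
--     # Index-based approach: locate all '---' markers up front, then slice
--     # past the second one and filter out any remaining markers.
--     targets = [t for _, t in translated_lines]
--     markers = [i for i, t in enumerate(targets) if t == "---"]
--     if len(markers) >= 2:
--         for t in targets[markers[1] + 1:]:
--             if t != "---":
--                 yield t
-- ===== Notes on version B (the rewrite author's own statement) =====
-- stated objective: alternative
-- what changed: Instead of a stateful scan carrying a marker counter, B first builds the list of all '---' marker indices with enumerate, then slices the targets past the second marker index and filters out remaining markers.
import Mathlib
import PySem

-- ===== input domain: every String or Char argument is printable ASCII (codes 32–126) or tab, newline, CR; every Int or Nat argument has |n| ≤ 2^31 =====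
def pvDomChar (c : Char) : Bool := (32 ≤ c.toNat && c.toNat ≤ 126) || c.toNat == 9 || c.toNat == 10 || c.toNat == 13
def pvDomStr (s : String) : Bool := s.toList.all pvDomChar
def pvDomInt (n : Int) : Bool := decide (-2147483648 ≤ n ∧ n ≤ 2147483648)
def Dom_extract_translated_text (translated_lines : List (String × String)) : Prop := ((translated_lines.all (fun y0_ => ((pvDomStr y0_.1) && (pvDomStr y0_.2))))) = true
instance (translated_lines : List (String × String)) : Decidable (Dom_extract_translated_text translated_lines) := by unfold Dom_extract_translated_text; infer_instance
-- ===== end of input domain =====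

-- B replaces A's stateful counter scan by an index-based computation: collect all '---'
-- marker indices with enumerate, slice past the second one, filter; objective: alternative.

-- ===== PORT A =====
-- A's loop: carries marker_count; increments on '---', yields only when count ≥ 2 and line ≠ '---'
def pvGoA : List (String × String) → Nat → List String
  | [], _ => []
  | (_, t) :: rest, c =>
      if t = "---" then
        let c' := c + 1
        if c' < 2 then pvGoA rest c'                    -- continue (before second marker)
        else pvGoA rest c'                              -- '---' with count ≥ 2: continue
      else if 2 ≤ c then t :: pvGoA rest c              -- yield
      else pvGoA rest c

def extract_translated_text (translated_lines : List (String × String)) : List String :=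
  pvGoA translated_lines 0

-- ===== PORT B =====
-- [i for i, t in enumerate(targets) if t == "---"]; the start index is a parameter (0 in the
-- call below) only so the proofs can recurse on it
def pvMarkersFrom (targets : List String) (s : Int) : List Int :=
  ((PySem.List.enumerate targets s).filter (fun p => p.2 == "---")).map Prod.fst

def extract_translated_text_alt (translated_lines : List (String × String)) : List String :=
  let targets := translated_lines.map Prod.snd
  let markers := pvMarkersFrom targets 0
  -- 'if len(markers) >= 2: … targets[markers[1]+1:] …' = match on markers[1]?
  match markers[1]? with
  | some k => (PySem.List.slice targets (some (k + 1)) none).filter (fun t => t != "---")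
  | none => []

-- ===== PRECONDITION & SPEC =====
def Spec_extract_translated_text (translated_lines : List (String × String)) (out : List String) : Prop := out = extract_translated_text_alt translated_lines
instance (translated_lines : List (String × String)) (out : List String) : Decidable (Spec_extract_translated_text translated_lines out) := by unfold Spec_extract_translated_text; infer_instance

-- ===== CLAIM (what is proved, stated in full; the proofs are below) =====
def Claim_equal_extract_translated_text : Prop := ∀ (translated_lines : List (String × String)), Dom_extract_translated_text translated_lines → Spec_extract_translated_text translated_lines (extract_translated_text translated_lines)

-- ===== LEMMAS AND PROOFS =====

-- A's loop over the target strings only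
def pvGoS : List String → Nat → List String
  | [], _ => []
  | t :: rest, c =>
      if t = "---" then pvGoS rest (c + 1)
      else if 2 ≤ c then t :: pvGoS rest c
      else pvGoS rest c

-- B's tail computation, as a function of the marker index looked up
def pvBCore (ts : List String) (n : Nat) : List String :=
  match (pvMarkersFrom ts 0)[n]? with
  | some k => (PySem.List.slice ts (some (k + 1)) none).filter (fun t => t != "---")
  | none => []

theorem pvGoA_eq_goS (ls : List (String × String)) (c : Nat) :
    pvGoA ls c = pvGoS (ls.map Prod.snd) c := by
  induction ls generalizing c with
  | nil => simp [pvGoA, pvGoS]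
  | cons p rest ih =>
      obtain ⟨s, t⟩ := p
      by_cases ht : t = "---" <;> by_cases hc : 2 ≤ c <;>
        simp [pvGoA, pvGoS, ht, hc, ih]

theorem pvMarkersFrom_cons (t : String) (ts : List String) (s : Int) :
    pvMarkersFrom (t :: ts) s =
      if t = "---" then s :: pvMarkersFrom ts (s + 1) else pvMarkersFrom ts (s + 1) := by
  by_cases ht : t = "---" <;>
    simp [pvMarkersFrom, PySem.List.enumerate_cons, ht]

theorem pvMarkersFrom_shift (ts : List String) (s : Int) :
    pvMarkersFrom ts (s + 1) = (pvMarkersFrom ts s).map (· + 1) := by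
  induction ts generalizing s with
  | nil => simp [pvMarkersFrom, PySem.List.enumerate]
  | cons t rest ih =>
      by_cases ht : t = "---"
      · rw [pvMarkersFrom_cons, if_pos ht, pvMarkersFrom_cons, if_pos ht,
            List.map_cons, ih (s + 1)]
      · rw [pvMarkersFrom_cons, if_neg ht, pvMarkersFrom_cons, if_neg ht, ih (s + 1)]

theorem pvMarkersFrom_nonneg (ts : List String) (s : Int) :
    ∀ x ∈ pvMarkersFrom ts s, s ≤ x := by
  induction ts generalizing s with
  | nil => simp [pvMarkersFrom, PySem.List.enumerate]
  | cons t rest ih =>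
      intro x hx
      rw [pvMarkersFrom_cons] at hx
      by_cases ht : t = "---"
      · rw [if_pos ht] at hx
        rcases List.mem_cons.mp hx with h | h
        · omega
        · have := ih (s + 1) x h; omega
      · rw [if_neg ht] at hx
        have := ih (s + 1) x hx; omega

-- phase after the second marker: A's loop is a plain filter
theorem pvGoS_of_ge_two (ts : List String) (c : Nat) (h : 2 ≤ c) :
    pvGoS ts c = ts.filter (fun t => t != "---") := by
  induction ts generalizing c with
  | nil => simp [pvGoS]
  | cons t rest ih =>
      by_cases ht : t = "---"
      · simp [pvGoS, ht, ih _ (by omega : 2 ≤ c + 1)]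
      · have hb : (t != "---") = true := by simp [ht]
        simp [pvGoS, ht, if_pos h, ih _ h, hb]

-- shifting all marker indices by one while consing a head leaves pvBCore unchanged
theorem pvBCore_shift (t : String) (ts : List String) (n : Nat) :
    (match ((pvMarkersFrom ts 0).map (· + 1))[n]? with
      | some k => (PySem.List.slice (t :: ts) (some (k + 1)) none).filter (fun t => t != "---")
      | none => ([] : List String)) = pvBCore ts n := by
  unfold pvBCore
  cases h : (pvMarkersFrom ts 0)[n]? with
  | none => simp [h]
  | some k =>
      have hmem : k ∈ pvMarkersFrom ts 0 := List.mem_of_getElem? h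
      have hk : (0 : Int) ≤ k := pvMarkersFrom_nonneg ts 0 k hmem
      simp only [List.getElem?_map, h, Option.map_some]
      rw [PySem.List.slice_from _ (by omega : (0:Int) ≤ k + 1 + 1),
          PySem.List.slice_from _ (by omega : (0:Int) ≤ k + 1)]
      have : (k + 1 + 1).toNat = (k + 1).toNat + 1 := by omega
      rw [this, List.drop_succ_cons]

theorem pvGoS_eq_bcore (ts : List String) (c : Nat) (h : c < 2) :
    pvGoS ts c = pvBCore ts (1 - c) := by
  induction ts generalizing c with
  | nil => simp [pvGoS, pvBCore, pvMarkersFrom, PySem.List.enumerate]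
  | cons t rest ih =>
      by_cases ht : t = "---"
      · rcases (by omega : c = 0 ∨ c = 1) with hc | hc <;> subst hc
        · -- first marker: recurse with count 1; index 1 of markers = index 0 of the tail's, +1
          rw [pvGoS, if_pos ht, ih 1 (by omega)]
          unfold pvBCore
          rw [pvMarkersFrom_cons, if_pos ht, pvMarkersFrom_shift]
          show pvBCore rest 0 = _
          rw [← pvBCore_shift t rest 0]
          simp
        · -- second marker: rest is filtered
          rw [pvGoS, if_pos ht, pvGoS_of_ge_two rest 2 (by omega)]
          have h0 : (pvMarkersFrom (t :: rest) 0)[1 - 1]? = some (0 : Int) := by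
            rw [pvMarkersFrom_cons, if_pos ht]; rfl
          unfold pvBCore
          simp only [h0]
          rw [PySem.List.slice_from _ (by omega : (0:Int) ≤ 0 + 1)]
          norm_num
      · rw [pvGoS, if_neg ht, if_neg (by omega : ¬ 2 ≤ c), ih c h]
        unfold pvBCore
        rw [pvMarkersFrom_cons, if_neg ht, pvMarkersFrom_shift]
        exact (pvBCore_shift t rest (1 - c)).symm

-- ===== VERDICT (by name: the statement is the Claim_ definition above) =====
theorem extract_translated_text_spec : Claim_equal_extract_translated_text := by
  intro ls _
  unfold Spec_extract_translated_text extract_translated_text extract_translated_text_alt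
  rw [pvGoA_eq_goS, pvGoS_eq_bcore _ 0 (by omega)]
  rfl
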